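-- pv_equiv track=rewrite | github.com/xslower/python | quant/bak/three/main.py | getMinBeforeMax
-- ===== SOURCE A (Python) =====
-- def getMinBeforeMax(val_list):
--     mn = 99999
--     min_idx = 0
--     for i in range(0, len(val_list)):
--         if val_list[i] < mn:
--             mn = val_list[i]
--             min_idx = i
--     mx = mn
--     max_idx = min_idx
--     for i in range(min_idx, len(val_list)):
--         if val_list[i] > mx:
--             mx = val_list[i]
--             max_idx = i
--     return [min_idx, mn, max_idx, mx]
-- ===== SOURCE B (Python) =====
-- def getMinBeforeMax(val_list):
--     mn = 99999
--     min_idx = 0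
--     mx = 99999
--     max_idx = 0
--     for i, v in enumerate(val_list):
--         if v < mn:
--             mn = v
--             min_idx = i
--             mx = v
--             max_idx = i
--         elif v > mx:
--             mx = v
--             max_idx = i
--     return [min_idx, mn, max_idx, mx]
-- ===== Notes on version B (the rewrite author's own statement) =====
-- stated objective: alternative
-- what changed: Replaces A's two sequential index scans (min scan, then a second scan from min_idx) by one single pass that resets the running max whenever a new minimum is found.
import Mathlib
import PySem

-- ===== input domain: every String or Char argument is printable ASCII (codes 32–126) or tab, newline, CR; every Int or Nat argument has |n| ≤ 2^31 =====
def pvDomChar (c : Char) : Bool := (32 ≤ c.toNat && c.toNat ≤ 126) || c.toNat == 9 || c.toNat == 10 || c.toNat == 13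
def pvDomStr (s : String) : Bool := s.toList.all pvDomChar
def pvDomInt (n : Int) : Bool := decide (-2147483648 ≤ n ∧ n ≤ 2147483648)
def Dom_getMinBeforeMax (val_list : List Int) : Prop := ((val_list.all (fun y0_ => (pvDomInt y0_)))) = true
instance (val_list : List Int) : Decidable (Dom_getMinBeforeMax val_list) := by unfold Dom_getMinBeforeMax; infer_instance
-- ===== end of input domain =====

-- B fuses A's two sequential index scans into one pass that resets the running max at each new minimum (alternative decomposition, same cost).


-- ===== PORT A =====
-- first loop of A: for i in range(0, len): if val_list[i] < mn: mn, min_idx = val_list[i], i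
def aFst (val_list : List Int) : Int × Int :=
  (PySem.List.pyRange 0 (val_list.length : Int) 1).foldl
    (fun s i => if PySem.List.pyGetD val_list i 0 < s.1 then (PySem.List.pyGetD val_list i 0, i) else s)
    (99999, 0)

-- second loop of A: for i in range(min_idx, len): if val_list[i] > mx: mx, max_idx = val_list[i], i
def aSnd (val_list : List Int) (p : Int × Int) : Int × Int :=
  (PySem.List.pyRange p.2 (val_list.length : Int) 1).foldl
    (fun s i => if PySem.List.pyGetD val_list i 0 > s.1 then (PySem.List.pyGetD val_list i 0, i) else s)
    p

def getMinBeforeMax (val_list : List Int) : List Int :=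
  let p := aFst val_list
  let q := aSnd val_list p
  [p.2, p.1, q.2, q.1]

-- ===== PORT B =====
-- single pass over enumerate(val_list): state (mn, min_idx, mx, max_idx)
def bStep (s : Int × Int × Int × Int) (p : Int × Int) : Int × Int × Int × Int :=
  if p.2 < s.1 then (p.2, p.1, p.2, p.1)
  else if p.2 > s.2.2.1 then (s.1, s.2.1, p.2, p.1)
  else s

def getMinBeforeMax_alt (val_list : List Int) : List Int :=
  let s := (PySem.List.enumerate val_list 0).foldl bStep (99999, 0, 99999, 0)
  [s.2.1, s.1, s.2.2.2, s.2.2.1]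

-- ===== PRECONDITION & SPEC =====
def Spec_getMinBeforeMax (val_list : List Int) (out : List Int) : Prop := out = getMinBeforeMax_alt val_list
instance (val_list : List Int) (out : List Int) : Decidable (Spec_getMinBeforeMax val_list out) := by unfold Spec_getMinBeforeMax; infer_instance

-- ===== CLAIM (what is proved, stated in full; the proofs are below) =====
def Claim_equal_getMinBeforeMax : Prop := ∀ (val_list : List Int), Dom_getMinBeforeMax val_list → Spec_getMinBeforeMax val_list (getMinBeforeMax val_list)

-- ===== LEMMAS AND PROOFS =====

-- the appended element is read at index len(l)
theorem getD_append_last (l : List Int) (x : Int) :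
    PySem.List.pyGetD (l ++ [x]) (l.length : Int) 0 = x := by
  rw [PySem.List.pyGetD_eq_getElem _ _ (Int.natCast_nonneg _) (by simp)]
  simp

-- indices below len(l) read the same value in l ++ [x] as in l (min-scan body)
theorem foldMin_append (l : List Int) (x a : Int) (ha : 0 ≤ a) (init : Int × Int) :
    (PySem.List.pyRange a (l.length : Int) 1).foldl
      (fun s i => if PySem.List.pyGetD (l ++ [x]) i 0 < s.1 then (PySem.List.pyGetD (l ++ [x]) i 0, i) else s) init
    = (PySem.List.pyRange a (l.length : Int) 1).foldl
      (fun s i => if PySem.List.pyGetD l i 0 < s.1 then (PySem.List.pyGetD l i 0, i) else s) init := by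
  apply PySem.List.foldl_congr_mem
  intro acc i hi
  rw [PySem.List.mem_pyRange_one] at hi
  rw [PySem.List.pyGetD_eq_getElem (l ++ [x]) 0 (by omega) (by simp; omega),
      PySem.List.pyGetD_eq_getElem l 0 (by omega) (by omega),
      List.getElem_append_left (by omega)]

-- same for the max-scan body
theorem foldMax_append (l : List Int) (x a : Int) (ha : 0 ≤ a) (init : Int × Int) :
    (PySem.List.pyRange a (l.length : Int) 1).foldl
      (fun s i => if PySem.List.pyGetD (l ++ [x]) i 0 > s.1 then (PySem.List.pyGetD (l ++ [x]) i 0, i) else s) init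
    = (PySem.List.pyRange a (l.length : Int) 1).foldl
      (fun s i => if PySem.List.pyGetD l i 0 > s.1 then (PySem.List.pyGetD l i 0, i) else s) init := by
  apply PySem.List.foldl_congr_mem
  intro acc i hi
  rw [PySem.List.mem_pyRange_one] at hi
  rw [PySem.List.pyGetD_eq_getElem (l ++ [x]) 0 (by omega) (by simp; omega),
      PySem.List.pyGetD_eq_getElem l 0 (by omega) (by omega),
      List.getElem_append_left (by omega)]

-- snoc step for A's first loop
theorem aFst_append (l : List Int) (x : Int) :
    aFst (l ++ [x]) = if x < (aFst l).1 then (x, (l.length : Int)) else aFst l := by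
  unfold aFst
  rw [show ((l ++ [x]).length : Int) = (l.length : Int) + 1 by simp]
  rw [PySem.List.pyRange_one_succ_right (Int.natCast_nonneg _), List.foldl_append,
      foldMin_append l x 0 le_rfl]
  simp only [List.foldl]
  rw [getD_append_last]

-- the min-scan only visits indices of the list, so its min_idx stays in [0, length]
theorem aFst_idx_bounds (l : List Int) : 0 ≤ (aFst l).2 ∧ (aFst l).2 ≤ (l.length : Int) := by
  induction l using List.reverseRecOn with
  | nil => simp [aFst, PySem.List.pyRange]
  | append_singleton l x ih =>
    rw [aFst_append, List.length_append, List.length_cons, List.length_nil]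
    push_cast
    split <;> constructor <;> omega

-- snoc step for A's second loop, given the bounds on the start index
theorem aSnd_append (l : List Int) (x : Int) (p : Int × Int)
    (h0 : 0 ≤ p.2) (h1 : p.2 ≤ (l.length : Int)) :
    aSnd (l ++ [x]) p =
      (if x > (aSnd l p).1 then (x, (l.length : Int)) else aSnd l p) := by
  unfold aSnd
  rw [show ((l ++ [x]).length : Int) = (l.length : Int) + 1 by simp]
  rw [PySem.List.pyRange_one_succ_right h1, List.foldl_append,
      foldMax_append l x p.2 h0]
  simp only [List.foldl]
  rw [getD_append_last]

-- the key invariant: B's single-pass state is exactly (A's min scan, A's max-after-min scan)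
theorem main_inv (l : List Int) :
    (PySem.List.enumerate l 0).foldl bStep (99999, 0, 99999, 0)
      = ((aFst l).1, (aFst l).2, (aSnd l (aFst l)).1, (aSnd l (aFst l)).2) := by
  induction l using List.reverseRecOn with
  | nil => simp [aFst, aSnd, PySem.List.enumerate, PySem.List.pyRange]
  | append_singleton l x ih =>
    rw [PySem.List.enumerate_append, List.foldl_append, ih]
    have hb := aFst_idx_bounds l
    have hsnoc := aFst_append l x
    have hsnd := aSnd_append l x (aFst l) hb.1 hb.2
    by_cases hx : x < (aFst l).1
    · -- new strict minimum: both sides reset to (x, len, x, len)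
      have hA1 : aFst (l ++ [x]) = (x, (l.length : Int)) := by rw [hsnoc, if_pos hx]
      have hA2 : aSnd (l ++ [x]) (x, (l.length : Int)) = (x, (l.length : Int)) := by
        unfold aSnd
        rw [show ((l ++ [x]).length : Int) = (l.length : Int) + 1 by simp]
        simp only
        rw [PySem.List.pyRange_one_succ_right le_rfl, PySem.List.pyRange_one_eq_nil le_rfl]
        simp only [List.nil_append, List.foldl]
        rw [getD_append_last, if_neg (lt_irrefl x)]
      rw [hA1, hA2]
      simp only [PySem.List.enumerate, List.foldl, bStep]
      rw [if_pos (by simpa using hx)]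
      norm_num
    · -- no new minimum: min state unchanged, max state steps on x
      have hA1 : aFst (l ++ [x]) = aFst l := by rw [hsnoc, if_neg hx]
      rw [hA1, hsnd]
      simp only [PySem.List.enumerate, List.foldl, bStep]
      rw [if_neg (by simpa using hx)]
      by_cases hm : x > (aSnd l (aFst l)).1
      · rw [if_pos hm, if_pos (by simpa using hm)]
        norm_num
      · rw [if_neg hm, if_neg (by simpa using hm)]

-- ===== VERDICT (by name: the statement is the Claim_ definition above) =====
theorem getMinBeforeMax_spec : Claim_equal_getMinBeforeMax := by
  intro l _
  unfold Spec_getMinBeforeMax getMinBeforeMax getMinBeforeMax_alt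
  rw [main_inv]
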